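-- pv_equiv track=rewrite | github.com/hcnt/aoc2024 | day22/day22.py | generate_sequence_map
-- ===== SOURCE A (Python) =====
-- from itertools import pairwise
-- from collections import deque, defaultdict
--
-- def mix(secret, num):
--     return secret ^ num
--
-- def prune(secret):
--     return secret % 16777216
--
-- def next_secret(secret):
--     secret = prune(mix(secret, secret * 64))
--     secret = prune(mix(secret, secret // 32))
--     secret = prune(mix(secret, secret * 2048))
--     return secret
--
-- def prices(starting_secret):
--     secret = starting_secret
--     while True:
--         yield secret % 10
--         secret = next_secret(secret)
--
-- def price_diffs(prices_iter):
--     for a, b in pairwise(prices_iter):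
--         yield b - a
--
-- def groupwise(iter, n):
--     q = deque(maxlen=n)
--     for item in iter:
--         q.append(item)
--         if len(q) == n:
--             yield tuple(q)
--
-- def sequence_to_price_iter(starting_secret):
--     consecutive_changes_iter = groupwise(
--         price_diffs(prices(starting_secret)), 4)
--     prices_iter = prices(starting_secret)
--     for _ in range(4):
--         next(prices_iter)
--     return zip(consecutive_changes_iter, prices_iter)
--
-- def generate_sequence_map(starting_secret, n):
--     sequence_map = {}
--     for i, (seq, price) in enumerate(sequence_to_price_iter(starting_secret)):
--         if i == n - 4:
--             break
--         if seq not in sequence_map: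
--             sequence_map[seq] = price
--     return sequence_map
-- ===== SOURCE B (Python) =====
-- def next_secret(secret):
--     secret = (secret ^ (secret * 64)) % 16777216
--     secret = (secret ^ (secret // 32)) % 16777216
--     secret = (secret ^ (secret * 2048)) % 16777216
--     return secret
--
--
-- def generate_sequence_map(starting_secret, n):
--     # One explicit pass: precompute the first n prices, then scan windows by index.
--     ps = []
--     s = starting_secret
--     for _ in range(n):
--         ps.append(s % 10)
--         s = next_secret(s)
--     m = {}
--     for i in range(n - 4):
--         key = (ps[i + 1] - ps[i], ps[i + 2] - ps[i + 1],
--                ps[i + 3] - ps[i + 2], ps[i + 4] - ps[i + 3])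
--         if key not in m:
--             m[key] = ps[i + 4]
--     return m
-- ===== Notes on version B (the rewrite author's own statement) =====
-- stated objective: simpler
-- what changed: Replaces A's four chained generators (infinite price stream, pairwise diffs, deque-based groupwise windows, a 4-skipped zip with a break counter) by one precomputed list of the first n prices and a single indexed loop over windows i..i+4 inserting first-seen keys.
-- outside the precondition, e.g. on generate_sequence_map(123, 3): A does not finish within the time limit, B returns {}
import Mathlib
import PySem

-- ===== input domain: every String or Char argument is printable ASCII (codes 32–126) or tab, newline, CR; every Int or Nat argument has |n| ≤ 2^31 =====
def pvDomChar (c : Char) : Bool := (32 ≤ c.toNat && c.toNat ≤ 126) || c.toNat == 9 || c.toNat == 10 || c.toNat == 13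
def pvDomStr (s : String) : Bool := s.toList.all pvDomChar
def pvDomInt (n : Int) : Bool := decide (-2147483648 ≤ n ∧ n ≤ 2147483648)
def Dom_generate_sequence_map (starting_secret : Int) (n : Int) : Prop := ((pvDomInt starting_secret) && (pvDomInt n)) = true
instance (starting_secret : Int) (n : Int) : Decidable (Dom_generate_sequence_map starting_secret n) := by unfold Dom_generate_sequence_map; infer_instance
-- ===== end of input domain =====

-- B collapses A's generator pipeline (prices / pairwise diffs / deque groupwise / zip)
-- into one precomputed price list and a single indexed scan over windows (objective: simpler).

-- shared helper: next_secret (identical in both Python files)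
def pvNextSecret (secret : Int) : Int :=
  let s1 := PySem.Int.mod (PySem.Int.bxor secret (secret * 64)) 16777216
  let s2 := PySem.Int.mod (PySem.Int.bxor s1 (PySem.Int.floordiv s1 32)) 16777216
  PySem.Int.mod (PySem.Int.bxor s2 (s2 * 2048)) 16777216

-- shared helper: 'seq not in sequence_map' — the dict has 4-tuple keys, flattened here
-- to 5-tuples (key components, price); all inserts are at fresh keys, so an append-only
-- association list is exact for dict insertion order.
def pvKeyMem (m : List (Int × Int × Int × Int × Int)) (k : Int × Int × Int × Int) : Bool :=
  m.any (fun e => (e.1, e.2.1, e.2.2.1, e.2.2.2.1) == k)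

-- ===== PORT A =====
-- A's zipped-generator loop: state is the pairwise generator's previous price `prev`,
-- the diff stream's secret `sd`, the 4-skipped prices_iter's secret `sp`, the groupwise
-- deque `q`, the enumerate counter `i`, and the dict `m`.  Each step pulls one
-- (seq, price) pair exactly as the pipeline does; the break check `i == n - 4` is
-- tested before the (pure) pull, which returns the same value.  fuel = (n-4).toNat + 1
-- covers exactly the iterations executed when n ≥ 4 (for n < 4 Python never terminates;
-- excluded by Pre_).
def pvLoopA (fuel : Nat) (i n prev sd sp : Int) (q : List Int)
    (m : List (Int × Int × Int × Int × Int)) : List (Int × Int × Int × Int × Int) :=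
  match fuel with
  | 0 => m
  | fuel + 1 =>
    if i = n - 4 then m
    else
      let p := PySem.Int.mod sd 10                 -- next price of the diff stream
      let d := p - prev                            -- pairwise diff
      let q' := if q.length == 4 then q.tail ++ [d] else q ++ [d]  -- deque(maxlen=4).append
      let price := PySem.Int.mod sp 10             -- next(prices_iter)
      match q' with
      | [d1, d2, d3, d4] =>
        let m' := if pvKeyMem m (d1, d2, d3, d4) then m
                  else m ++ [(d1, d2, d3, d4, price)]
        pvLoopA fuel (i + 1) n p (pvNextSecret sd) (pvNextSecret sp) q' m'
      | _ => m   -- unreachable: after the initial fill q' always has 4 elements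

def generate_sequence_map (starting_secret : Int) (n : Int) : List (Int × Int × Int × Int × Int) :=
  -- lazy initial fill of the pipeline: prices p0..p3 and the first three diffs
  let p0 := PySem.Int.mod starting_secret 10
  let s1 := pvNextSecret starting_secret
  let p1 := PySem.Int.mod s1 10
  let s2 := pvNextSecret s1
  let p2 := PySem.Int.mod s2 10
  let s3 := pvNextSecret s2
  let p3 := PySem.Int.mod s3 10
  let s4 := pvNextSecret s3
  pvLoopA ((n - 4).toNat + 1) 0 n p3 s4 s4 [p1 - p0, p2 - p1, p3 - p2] []

-- ===== PORT B =====
-- first loop of Source B: ps = [s % 10 for n steps, advancing s]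
def pvPrices (starting_secret : Int) (n : Int) : List Int :=
  ((PySem.List.pyRange 0 n 1).foldl
    (fun (st : List Int × Int) _ => (st.1 ++ [PySem.Int.mod st.2 10], pvNextSecret st.2))
    ([], starting_secret)).1

def generate_sequence_map_alt (starting_secret : Int) (n : Int) : List (Int × Int × Int × Int × Int) :=
  let ps := pvPrices starting_secret n
  (PySem.List.pyRange 0 (n - 4) 1).foldl
    (fun m i =>
      let key := (PySem.List.pyGetD ps (i + 1) 0 - PySem.List.pyGetD ps i 0,
                  PySem.List.pyGetD ps (i + 2) 0 - PySem.List.pyGetD ps (i + 1) 0,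
                  PySem.List.pyGetD ps (i + 3) 0 - PySem.List.pyGetD ps (i + 2) 0,
                  PySem.List.pyGetD ps (i + 4) 0 - PySem.List.pyGetD ps (i + 3) 0)
      if pvKeyMem m key then m
      else m ++ [(key.1, key.2.1, key.2.2.1, key.2.2.2, PySem.List.pyGetD ps (i + 4) 0)])
    []

-- ===== PRECONDITION & SPEC =====
-- Pre_ excludes n < 4, where Python A's loop never reaches i == n - 4 and diverges
-- (the zipped generators are infinite); it admits every input on which A returns.
def Pre_generate_sequence_map (starting_secret : Int) (n : Int) : Prop := 4 ≤ n
instance (starting_secret : Int) (n : Int) : Decidable (Pre_generate_sequence_map starting_secret n) := by unfold Pre_generate_sequence_map; infer_instance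
def pvWitness_generate_sequence_map : Int × Int := (123, 9)

def Spec_generate_sequence_map (starting_secret : Int) (n : Int) (out : List (Int × Int × Int × Int × Int)) : Prop := out = generate_sequence_map_alt starting_secret n
instance (starting_secret : Int) (n : Int) (out : List (Int × Int × Int × Int × Int)) : Decidable (Spec_generate_sequence_map starting_secret n out) := by unfold Spec_generate_sequence_map; infer_instance

-- ===== CLAIM (what is proved, stated in full; the proofs are below) =====
def Claim_equal_generate_sequence_map : Prop := ∀ (starting_secret : Int) (n : Int), Dom_generate_sequence_map starting_secret n → Pre_generate_sequence_map starting_secret n → Spec_generate_sequence_map starting_secret n (generate_sequence_map starting_secret n)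

-- ===== LEMMAS AND PROOFS =====

-- proof-only helpers: the k-th secret, the k-th price, and the common per-window step
def pvS (start : Int) : Nat → Int
  | 0 => start
  | k + 1 => pvNextSecret (pvS start k)

def pvP (start : Int) (k : Nat) : Int := PySem.Int.mod (pvS start k) 10

def pvF (start : Int) (j : Nat) (m : List (Int × Int × Int × Int × Int)) :
    List (Int × Int × Int × Int × Int) :=
  let k1 := pvP start (j + 1) - pvP start j
  let k2 := pvP start (j + 2) - pvP start (j + 1)
  let k3 := pvP start (j + 3) - pvP start (j + 2)
  let k4 := pvP start (j + 4) - pvP start (j + 3)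
  if pvKeyMem m (k1, k2, k3, k4) then m else m ++ [(k1, k2, k3, k4, pvP start (j + 4))]

lemma pvLoopA_eq (start n : Int) :
    ∀ (c j : Nat) (m : List (Int × Int × Int × Int × Int)) (q : List Int),
      (j : Int) + c = n - 4 →
      q = (if j = 0 then
            [pvP start 1 - pvP start 0, pvP start 2 - pvP start 1, pvP start 3 - pvP start 2]
          else
            [pvP start j - pvP start (j - 1), pvP start (j + 1) - pvP start j,
             pvP start (j + 2) - pvP start (j + 1), pvP start (j + 3) - pvP start (j + 2)]) →
      pvLoopA (c + 1) (j : Int) n (pvP start (j + 3)) (pvS start (j + 4)) (pvS start (j + 4)) q m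
        = (List.range' j c).foldl (fun m k => pvF start k m) m := by
  intro c
  induction c with
  | zero =>
      intro j m q hj hq
      have hbr : (j : Int) = n - 4 := by omega
      simp [pvLoopA, hbr]
  | succ c ih =>
      intro j m q hj hq
      have hne : ¬((j : Int) = n - 4) := by omega
      rw [List.range'_succ, List.foldl_cons]
      by_cases hj0 : j = 0
      · subst hj0
        subst hq
        conv_lhs => rw [pvLoopA]
        rw [if_neg hne]
        norm_num
        have h := ih 1 (if pvKeyMem m (pvP start 1 - pvP start 0, pvP start 2 - pvP start 1,
              pvP start 3 - pvP start 2, pvP start 4 - pvP start 3) = true then m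
            else m ++ [(pvP start 1 - pvP start 0, pvP start 2 - pvP start 1,
              pvP start 3 - pvP start 2, pvP start 4 - pvP start 3,
              PySem.Int.mod (pvS start 4) 10)])
          [pvP start 1 - pvP start 0, pvP start 2 - pvP start 1, pvP start 3 - pvP start 2,
            pvP start 4 - pvP start 3] (by push_cast at hj ⊢; omega) (by norm_num)
        simp only [pvP] at h ⊢
        norm_num at h ⊢
        rw [show pvNextSecret (pvS start 4) = pvS start 5 from rfl] at ⊢
        rw [h]
        simp [pvF, pvP]
      · have hq4 : q = [pvP start j - pvP start (j - 1), pvP start (j + 1) - pvP start j,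
            pvP start (j + 2) - pvP start (j + 1), pvP start (j + 3) - pvP start (j + 2)] := by
          rw [hq, if_neg hj0]
        subst hq4
        conv_lhs => rw [pvLoopA]
        rw [if_neg hne]
        norm_num
        have h := ih (j + 1) (if pvKeyMem m (pvP start (j + 1) - pvP start j,
              pvP start (j + 2) - pvP start (j + 1), pvP start (j + 3) - pvP start (j + 2),
              pvP start (j + 4) - pvP start (j + 3)) = true then m
            else m ++ [(pvP start (j + 1) - pvP start j, pvP start (j + 2) - pvP start (j + 1),
              pvP start (j + 3) - pvP start (j + 2), pvP start (j + 4) - pvP start (j + 3),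
              PySem.Int.mod (pvS start (j + 4)) 10)])
          [pvP start (j + 1) - pvP start j, pvP start (j + 2) - pvP start (j + 1),
            pvP start (j + 3) - pvP start (j + 2), pvP start (j + 4) - pvP start (j + 3)]
          (by push_cast at hj ⊢; omega)
          (by rw [if_neg (by omega : ¬(j + 1 = 0))]; norm_num)
        rw [show j + 1 + 3 = j + 4 from by omega, show j + 1 + 4 = j + 5 from by omega] at h
        simp only [pvP] at h ⊢
        norm_num at h ⊢
        rw [show pvNextSecret (pvS start (j + 4)) = pvS start (j + 5) from by
          rw [show j + 5 = (j + 4) + 1 from by omega]; rfl] at ⊢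
        rw [h]
        simp [pvF, pvP]

lemma pvPrices_fold (start : Int) :
    ∀ (l : List Int) (k : Nat),
      (l.foldl (fun (st : List Int × Int) _ =>
          (st.1 ++ [PySem.Int.mod st.2 10], pvNextSecret st.2))
        ((List.range k).map (pvP start), pvS start k)).1
        = (List.range (k + l.length)).map (pvP start) := by
  intro l
  induction l with
  | nil => intro k; simp
  | cons x xs ih =>
      intro k
      have h1 : (List.range k).map (pvP start) ++ [PySem.Int.mod (pvS start k) 10]
          = (List.range (k + 1)).map (pvP start) := by
        simp [List.range_succ, pvP]
      simp only [List.foldl_cons, h1]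
      have h2 := ih (k + 1)
      simp only [pvS] at h2 ⊢
      rw [h2]
      have h3 : k + 1 + xs.length = k + (x :: xs).length := by simp; omega
      rw [h3]

lemma pvPrices_eq (start : Int) (n : Int) :
    pvPrices start n = (List.range n.toNat).map (pvP start) := by
  unfold pvPrices
  have h := pvPrices_fold start (PySem.List.pyRange 0 n 1) 0
  simp only [List.range_zero, List.map_nil, pvS, Nat.zero_add] at h
  rw [h]
  congr 2
  simp [PySem.List.length_pyRange_one]

lemma portA_eq (start n : Int) (hn : 4 ≤ n) :
    generate_sequence_map start n
      = (List.range (n - 4).toNat).foldl (fun m k => pvF start k m) [] := by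
  unfold generate_sequence_map
  rw [List.range_eq_range']
  have h := pvLoopA_eq start n (n - 4).toNat 0 []
    [pvP start 1 - pvP start 0, pvP start 2 - pvP start 1, pvP start 3 - pvP start 2]
    (by push_cast; omega) (by norm_num)
  have e0 : pvS start 0 = start := rfl
  have e1 : pvS start 1 = pvNextSecret start := rfl
  have e2 : pvS start 2 = pvNextSecret (pvNextSecret start) := rfl
  have e3 : pvS start 3 = pvNextSecret (pvNextSecret (pvNextSecret start)) := rfl
  have e4 : pvS start 4 = pvNextSecret (pvNextSecret (pvNextSecret (pvNextSecret start))) := rfl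
  simp only [pvP, e0, e1, e2, e3, e4, Nat.cast_zero] at h
  exact h

lemma portB_eq (start n : Int) (hn : 4 ≤ n) :
    generate_sequence_map_alt start n
      = (List.range (n - 4).toNat).foldl (fun m k => pvF start k m) [] := by
  unfold generate_sequence_map_alt
  rw [pvPrices_eq, PySem.List.pyRange_one 0 (n - 4)]
  simp only [zero_add, sub_zero, List.foldl_map]
  apply PySem.List.foldl_congr_mem
  intro m k hk
  have hk' : k < (n - 4).toNat := List.mem_range.mp hk
  have hb : ∀ t : Nat, t ≤ 4 → k + t < n.toNat := by omega
  rw [show ((k:Int) + 1) = ((k + 1 : Nat) : Int) by push_cast; ring,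
      show ((k:Int) + 2) = ((k + 2 : Nat) : Int) by push_cast; ring,
      show ((k:Int) + 3) = ((k + 3 : Nat) : Int) by push_cast; ring,
      show ((k:Int) + 4) = ((k + 4 : Nat) : Int) by push_cast; ring]
  simp only [PySem.List.pyGetD_natCast,
    PySem.List.getD_map_range (pvP start) n.toNat k 0 (show k < n.toNat by omega),
    PySem.List.getD_map_range _ _ _ _ (hb 1 (by omega)),
    PySem.List.getD_map_range _ _ _ _ (hb 2 (by omega)),
    PySem.List.getD_map_range _ _ _ _ (hb 3 (by omega)),
    PySem.List.getD_map_range _ _ _ _ (hb 4 (by omega))]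
  simp only [pvF]

-- ===== VERDICT (by name: the statement is the Claim_ definition above) =====
theorem generate_sequence_map_spec : Claim_equal_generate_sequence_map := by
  intro s n _ hpre
  unfold Spec_generate_sequence_map
  rw [portA_eq s n hpre, portB_eq s n hpre]
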